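-- pv_equiv track=rewrite | github.com/floraren2702/fren.github.io | Computing_in_Context/review.py | more_as_than_bs
-- ===== SOURCE A (Python) =====
-- def more_as_than_bs(s):
--     count_a = 0
--     count_b = 0
--     for char in s:
--         if char == "a":
--             count_a += 1
--         elif char == "b":
--             count_b += 1
--     return count_a > count_b
-- ===== SOURCE B (Python) =====
-- def more_as_than_bs(s):
--     # Median-of-sorted approach: keep only the 'a'/'b' letters, sort them
--     # (all 'a's precede all 'b's), and test whether the upper-middle element
--     # is an 'a' -- true exactly when 'a' holds a strict majority among them,
--     # i.e. when there are more 'a's than 'b's.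
--     t = sorted(c for c in s if c == "a" or c == "b")
--     return bool(t) and t[len(t) // 2] == "a"
-- ===== Notes on version B (the rewrite author's own statement) =====
-- stated objective: alternative
-- what changed: Instead of counting the two letters in a loop and comparing counts, B filters the string to the relevant letters, sorts them, and tests whether the upper-middle element of the sorted run is the earlier letter (a strict-majority test by median selection).
import Mathlib
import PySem

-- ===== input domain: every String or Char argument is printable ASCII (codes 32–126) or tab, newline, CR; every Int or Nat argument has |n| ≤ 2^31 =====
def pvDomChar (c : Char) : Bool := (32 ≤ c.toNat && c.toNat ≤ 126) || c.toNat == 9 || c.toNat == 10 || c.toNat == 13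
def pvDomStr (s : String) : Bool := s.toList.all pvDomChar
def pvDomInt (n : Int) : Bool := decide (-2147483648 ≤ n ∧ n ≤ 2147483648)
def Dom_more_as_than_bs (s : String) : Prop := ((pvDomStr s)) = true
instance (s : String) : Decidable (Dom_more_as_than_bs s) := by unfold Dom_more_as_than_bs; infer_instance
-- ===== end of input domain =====

-- B replaces A's two-counter loop by a different algorithm: filter the string to its
-- 'a'/'b' letters, sort them, and test whether the upper-middle element is 'a'
-- (a strict-majority test by median selection); alternative, same result.

-- ===== PORT A =====
def more_as_than_bs (s : String) : Bool :=
  -- count_a = 0; count_b = 0; for char in s: …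
  let p := s.toList.foldl
    (fun (p : Int × Int) char =>
      if char == 'a' then (p.1 + 1, p.2)
      else if char == 'b' then (p.1, p.2 + 1)
      else p)
    (0, 0)
  decide (p.2 < p.1)   -- return count_a > count_b

-- ===== PORT B =====
def more_as_than_bs_alt (s : String) : Bool :=
  -- t = sorted(c for c in s if c == "a" or c == "b")
  let t := PySem.List.sorted (s.toList.filter (fun c => c == 'a' || c == 'b')) (fun c => c) false
  -- return bool(t) and t[len(t) // 2] == "a"   (the index is in range whenever t is nonempty)
  !t.isEmpty && (t[t.length / 2]? == some 'a')

-- ===== PRECONDITION & SPEC =====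
def Spec_more_as_than_bs (s : String) (out : Bool) : Prop := out = more_as_than_bs_alt s
instance (s : String) (out : Bool) : Decidable (Spec_more_as_than_bs s out) := by unfold Spec_more_as_than_bs; infer_instance

-- ===== CLAIM (what is proved, stated in full; the proofs are below) =====
def Claim_equal_more_as_than_bs : Prop := ∀ (s : String), Dom_more_as_than_bs s → Spec_more_as_than_bs s (more_as_than_bs s)

-- ===== LEMMAS AND PROOFS =====

-- A's loop computes the two character counts.
theorem pvFoldCounts (l : List Char) : ∀ (a b : Int),
    l.foldl (fun (p : Int × Int) char =>
        if char == 'a' then (p.1 + 1, p.2)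
        else if char == 'b' then (p.1, p.2 + 1)
        else p) (a, b)
      = (a + l.count 'a', b + l.count 'b') := by
  induction l with
  | nil => intro a b; simp
  | cons c t ih =>
    intro a b
    rw [List.foldl_cons]
    by_cases h1 : c = 'a'
    · subst h1
      have h : (if ('a' == 'a') = true then ((a, b).1 + 1, (a, b).2)
          else if ('a' == 'b') = true then ((a, b).1, (a, b).2 + 1) else (a, b)) = (a + 1, b) := by simp
      rw [h, ih]
      simp
      omega
    · by_cases h2 : c = 'b'
      · subst h2
        have h : (if ('b' == 'a') = true then ((a, b).1 + 1, (a, b).2)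
            else if ('b' == 'b') = true then ((a, b).1, (a, b).2 + 1) else (a, b)) = (a, b + 1) := by simp
        rw [h, ih]
        simp [h1]
        omega
      · have h : (if (c == 'a') = true then ((a, b).1 + 1, (a, b).2)
            else if (c == 'b') = true then ((a, b).1, (a, b).2 + 1) else (a, b)) = (a, b) := by
          simp [h1, h2]
        rw [h, ih]
        simp [List.count_cons]
        exact ⟨h1, h2⟩

-- The 'a'/'b' letters of l are, up to permutation, a block of 'a's followed by a block of 'b's.
theorem pvFilterPerm (l : List Char) :
    (List.replicate (l.count 'a') 'a' ++ List.replicate (l.count 'b') 'b').Perm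
      (l.filter (fun c => c == 'a' || c == 'b')) := by
  induction l with
  | nil => simp
  | cons c t ih =>
    by_cases h1 : c = 'a'
    · subst h1
      simpa [List.count_cons, List.filter_cons, List.replicate_succ] using ih.cons 'a'
    · by_cases h2 : c = 'b'
      · subst h2
        have : (List.replicate (t.count 'a') 'a' ++ 'b' :: List.replicate (t.count 'b') 'b').Perm
            ('b' :: t.filter (fun c => c == 'a' || c == 'b')) :=
          List.perm_middle.trans (ih.cons 'b')
        simpa [List.count_cons, h1, List.filter_cons, List.replicate_succ] using this
      · simpa [List.count_cons, Ne.symm h1, Ne.symm h2, List.filter_cons, h1, h2] using ih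
        
-- That block arrangement is weakly increasing.
theorem pvBlockPairwise (m n : Nat) :
    (List.replicate m 'a' ++ List.replicate n 'b').Pairwise (fun x y => x ≤ y) := by
  apply List.pairwise_append.mpr
  refine ⟨?_, ?_, ?_⟩
  · exact List.pairwise_replicate.mpr (Or.inr le_rfl)
  · exact List.pairwise_replicate.mpr (Or.inr le_rfl)
  · intro x hx y hy
    rw [List.eq_of_mem_replicate hx, List.eq_of_mem_replicate hy]
    decide

-- Hence B's sorted list IS that block arrangement.
theorem pvSortedEq (l : List Char) :
    PySem.List.sorted (l.filter (fun c => c == 'a' || c == 'b')) (fun c => c) false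
      = List.replicate (l.count 'a') 'a' ++ List.replicate (l.count 'b') 'b' :=
  PySem.List.sorted_id_eq_of_perm_of_pairwise _ _ (pvFilterPerm l) (pvBlockPairwise _ _)

-- ===== VERDICT (by name: the statement is the Claim_ definition above) =====
theorem more_as_than_bs_spec : Claim_equal_more_as_than_bs := by
  intro s _
  unfold Spec_more_as_than_bs more_as_than_bs more_as_than_bs_alt
  rw [pvSortedEq, pvFoldCounts s.toList 0 0]
  set ca := s.toList.count 'a' with hca
  set cb := s.toList.count 'b' with hcb
  simp only [zero_add, List.length_append, List.length_replicate]
  by_cases h : cb < ca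
  · have hne : (List.replicate ca 'a' ++ List.replicate cb 'b').isEmpty = false := by
      simp [List.append_eq_nil_iff, List.replicate_eq_nil_iff]
      omega
    have hidx : (ca + cb) / 2 < ca := by omega
    rw [List.getElem?_append_left (by simpa using hidx), List.getElem?_replicate_of_lt hidx]
    simp [hne, h]
  · have hidx : ca ≤ (ca + cb) / 2 := by omega
    by_cases hz : ca + cb = 0
    · have : ca = 0 ∧ cb = 0 := by omega
      simp [this.1, this.2]
    · have hlt : (ca + cb) / 2 < ca + cb := by omega
      have : (List.replicate ca 'a' ++ List.replicate cb 'b')[(ca + cb) / 2]? = some 'b' := by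
        rw [List.getElem?_append_right (by simpa using hidx)]
        rw [List.length_replicate]
        exact List.getElem?_replicate_of_lt (by omega)
      simp [this, h]
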